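-- pv_equiv track=rewrite | github.com/lingpy/lingpy | lingpy/sequence/ngrams.py | get_all_ngrams
-- ===== SOURCE A (Python) =====
-- def get_all_ngrams(sequence, sort=False):
--     """
--     Function returns all possible n-grams of a given sequence.
--
--     Parameters
--     ----------
--     sequence : list or str
--         The sequence that shall be converted into it's ngram-representation.
--
--     Returns
--     -------
--     out : list
--         A list of all ngrams of the input word, sorted in decreasing order of
--         length.
--
--     Examples
--     --------
--     >>> get_all_ngrams('abcde')
--     ['abcde', 'bcde', 'abcd', 'cde', 'abc', 'bcd', 'ab', 'de', 'cd', 'bc', 'a', 'e', 'b', 'd', 'c']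
--
--     """
--
--     # get the length of the word
--     l = len(sequence)
--
--     # determine the starting point
--     i = 0
--
--     # define the output list
--     out = []
--
--     # start the while loop
--     while i != l and i < l:
--         # copy the sequence
--         new_sequence = sequence[i:l]
--
--         # append the sequence to the output list
--         out += [new_sequence]
--
--         # loop over the new sequence
--         for j in range(1, len(new_sequence)):
--             out += [new_sequence[:j]]
--             out += [new_sequence[j:]]
--
--         # increment i and decrement l
--         i += 1
--         l -= 1
--
--     sort = sort or list
--
--     return sort(out)
-- ===== SOURCE B (Python) =====
-- def get_all_ngrams(sequence, sort=False):
--     """Recursive decomposition: emit the current window and its proper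
--     prefix/suffix splits, then recurse on the window peeled by one element
--     at each end (w[1:-1])."""
--     def helper(w):
--         if not w:
--             return []
--         out = [w]
--         for j in range(1, len(w)):
--             out.append(w[:j])
--             out.append(w[j:])
--         return out + helper(w[1:-1])
--     out = helper(sequence)
--     return sorted(out) if sort else out
-- ===== Notes on version B (the rewrite author's own statement) =====
-- stated objective: alternative
-- what changed: Replaces A's while loop over mutable (i, l) window indices with a recursion over the nested windows (emit w and its prefix/suffix splits, recurse on w[1:-1]), and replaces the 'sort = sort or list' callable trick with a plain sorted/identity branch.
-- outside the precondition, e.g. on get_all_ngrams('ab', True): A raises TypeError, B returns ['a', 'ab', 'b']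
-- crash fix: With a boolean sort argument, A raises TypeError when sort=True (it tries to call True(out)); B returns the lexicographically sorted list of ngrams there. — e.g. on get_all_ngrams("ba", true): A raises TypeError, B returns ["a", "b", "ba"]
import Mathlib
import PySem

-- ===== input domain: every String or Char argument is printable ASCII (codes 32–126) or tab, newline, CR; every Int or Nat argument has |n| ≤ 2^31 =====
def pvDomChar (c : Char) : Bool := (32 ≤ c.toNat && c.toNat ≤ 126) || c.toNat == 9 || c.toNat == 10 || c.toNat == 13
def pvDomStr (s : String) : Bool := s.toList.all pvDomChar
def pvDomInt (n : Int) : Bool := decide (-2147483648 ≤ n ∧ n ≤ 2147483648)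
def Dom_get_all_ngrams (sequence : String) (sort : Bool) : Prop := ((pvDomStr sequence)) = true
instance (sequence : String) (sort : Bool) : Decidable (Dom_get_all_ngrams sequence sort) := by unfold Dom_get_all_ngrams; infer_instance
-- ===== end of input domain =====

-- B replaces A's while loop over shrinking (i, l) indices with a recursion over the
-- nested windows w ↦ w[1:-1]; return values proved equal for sort = false (A raises
-- TypeError for sort = True, where B instead returns the sorted ngram list).

-- ===== PORT A =====
-- the while loop: state (i, l, out); condition 'i != l and i < l'
def pvALoop (cs : List Char) (i l : Int) (out : List String) : List String :=
  if h : i ≠ l ∧ i < l then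
    let new_sequence := PySem.List.slice cs (some i) (some l)
    let out1 := out ++ [String.mk new_sequence]
    let out2 := (PySem.List.pyRange 1 (new_sequence.length : Int) 1).foldl
      (fun acc j =>
        (acc ++ [String.mk (PySem.List.slice new_sequence none (some j))])
          ++ [String.mk (PySem.List.slice new_sequence (some j) none)]) out1
    pvALoop cs (i + 1) (l - 1) out2
  else out
termination_by (l - i).toNat
decreasing_by omega

def get_all_ngrams (sequence : String) (sort : Bool) : List String :=
  let cs := sequence.toList
  let out := pvALoop cs 0 (cs.length : Int) []
  -- 'sort = sort or list; return sort(out)': with sort=False this is list(out) = out;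
  -- with sort=True Python raises TypeError ('bool' is not callable) — excluded by Pre_.
  if sort then [] else out

-- ===== PORT B =====
-- fuel = |w| bounds the recursion depth (each step w is strictly shorter); it never cuts a computation short
def pvHelperF : Nat → List Char → List String
  | 0, _ => []
  | Nat.succ f, w =>
    if w = [] then []
    else
      (((PySem.List.pyRange 1 (w.length : Int) 1).foldl
          (fun acc j =>
            (acc ++ [String.mk (PySem.List.slice w none (some j))])
              ++ [String.mk (PySem.List.slice w (some j) none)]) [String.mk w])
        ++ pvHelperF f (PySem.List.slice w (some 1) (some (-1))))

def pvHelper (w : List Char) : List String := pvHelperF w.length w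

def get_all_ngrams_alt (sequence : String) (sort : Bool) : List String :=
  let out := pvHelper sequence.toList
  if sort then PySem.List.sorted out (fun x => x.toList) false else out

-- ===== PRECONDITION & SPEC =====
-- Pre_ excludes sort = true, on which A raises TypeError ('bool' object is not callable).
def Pre_get_all_ngrams (sequence : String) (sort : Bool) : Prop := sort = false
instance (sequence : String) (sort : Bool) : Decidable (Pre_get_all_ngrams sequence sort) := by unfold Pre_get_all_ngrams; infer_instance

def pvWitness_get_all_ngrams : String × Bool := ("abcde", false)

-- A raises TypeError whenever sort = true (it calls True(out)); B returns the sorted ngram list there.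
def Raises_get_all_ngrams (sequence : String) (sort : Bool) : Prop := sort = true
instance (sequence : String) (sort : Bool) : Decidable (Raises_get_all_ngrams sequence sort) := by unfold Raises_get_all_ngrams; infer_instance
def pvRaiseWitness_get_all_ngrams : String × Bool := ("ba", true)
def pvRaiseWitnessOut_get_all_ngrams : List String := ["a", "b", "ba"]

def Spec_get_all_ngrams (sequence : String) (sort : Bool) (out : List String) : Prop := out = get_all_ngrams_alt sequence sort
instance (sequence : String) (sort : Bool) (out : List String) : Decidable (Spec_get_all_ngrams sequence sort out) := by unfold Spec_get_all_ngrams; infer_instance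

-- ===== CLAIM (what is proved, stated in full; the proofs are below) =====
def Claim_equal_get_all_ngrams : Prop := ∀ (sequence : String) (sort : Bool), Dom_get_all_ngrams sequence sort → Pre_get_all_ngrams sequence sort → Spec_get_all_ngrams sequence sort (get_all_ngrams sequence sort)

def Claim_raises_get_all_ngrams : Prop := (∀ (sequence : String) (sort : Bool), Dom_get_all_ngrams sequence sort → Raises_get_all_ngrams sequence sort → ¬ Pre_get_all_ngrams sequence sort) ∧ (Dom_get_all_ngrams (pvRaiseWitness_get_all_ngrams.1) (pvRaiseWitness_get_all_ngrams.2) ∧ Raises_get_all_ngrams (pvRaiseWitness_get_all_ngrams.1) (pvRaiseWitness_get_all_ngrams.2) ∧ get_all_ngrams_alt (pvRaiseWitness_get_all_ngrams.1) (pvRaiseWitness_get_all_ngrams.2) = pvRaiseWitnessOut_get_all_ngrams)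

-- ===== LEMMAS AND PROOFS =====

-- folds that only append to the accumulator factor over it
theorem pv_foldl_factor {α β : Type} (f : List α → β → List α) (d : β → List α)
    (hf : ∀ acc j, f acc j = acc ++ d j) :
    ∀ (r : List β) (p : List α), r.foldl f p = p ++ r.foldl f []
  | [], p => by simp
  | j :: r, p => by
    simp only [List.foldl_cons, hf]
    rw [pv_foldl_factor f d hf r (p ++ d j), pv_foldl_factor f d hf r ([] ++ d j)]
    simp

-- w[1:-1] as drop/take
theorem pv_slice_peel (w : List Char) :
    PySem.List.slice w (some 1) (some (-1)) = (w.drop 1).take (w.length - 2) := by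
  rcases w with _ | ⟨c, t⟩
  · simp [PySem.List.slice]
  · simp [PySem.List.slice]

-- pvHelperF does not depend on the fuel once it covers |w|
theorem pvHelperF_fuel : ∀ (f g : Nat) (w : List Char), w.length ≤ f → w.length ≤ g →
    pvHelperF f w = pvHelperF g w
  | 0, g, w, hf, hg => by
    have hw : w = [] := List.eq_nil_of_length_eq_zero (Nat.le_zero.mp hf)
    subst hw
    cases g <;> simp [pvHelperF]
  | Nat.succ f, 0, w, hf, hg => by
    have hw : w = [] := List.eq_nil_of_length_eq_zero (Nat.le_zero.mp hg)
    subst hw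
    simp [pvHelperF]
  | Nat.succ f, Nat.succ g, w, hf, hg => by
    by_cases hw : w = []
    · subst hw; simp [pvHelperF]
    · have hpos := List.length_pos_of_ne_nil hw
      have hlen : (PySem.List.slice w (some 1) (some (-1))).length = w.length - 2 := by
        rw [pv_slice_peel]; simp; omega
      simp only [pvHelperF, if_neg hw]
      rw [pvHelperF_fuel f g _ (by omega) (by omega)]

-- one unfolding of pvHelper on a nonempty window
theorem pvHelper_cons (w : List Char) (hw : w ≠ []) :
    pvHelper w =
      (((PySem.List.pyRange 1 (w.length : Int) 1).foldl
          (fun acc j =>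
            (acc ++ [String.mk (PySem.List.slice w none (some j))])
              ++ [String.mk (PySem.List.slice w (some j) none)]) [String.mk w])
        ++ pvHelper (PySem.List.slice w (some 1) (some (-1)))) := by
  have hpos : 0 < w.length := List.length_pos_of_ne_nil hw
  have hlen : (PySem.List.slice w (some 1) (some (-1))).length = w.length - 2 := by
    rw [pv_slice_peel]; simp; omega
  obtain ⟨k, hk⟩ : ∃ k, w.length = k + 1 := ⟨w.length - 1, by omega⟩
  unfold pvHelper
  rw [hk]
  simp only [pvHelperF, if_neg hw, hk]
  congr 1
  exact pvHelperF_fuel k _ _ (by rw [hlen]; omega) le_rfl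

-- the window A works on at state (i = a, l = b) is the slice (cs.drop a).take (b - a)
theorem pvALoop_eq_helper : ∀ (n : Nat) (cs : List Char) (a b : Nat), b - a = n → b ≤ cs.length →
    ∀ (out : List String),
    pvALoop cs (a : Int) (b : Int) out = out ++ pvHelper ((cs.drop a).take (b - a)) := by
  intro n
  induction n using Nat.strong_induction_on with
  | _ n ih =>
    intro cs a b hn hb out
    by_cases hab : a < b
    · have hcond : ((a : Int) ≠ (b : Int) ∧ (a : Int) < (b : Int)) :=
        ⟨by exact_mod_cast Nat.ne_of_lt hab, by exact_mod_cast hab⟩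
      rw [pvALoop, dif_pos hcond]
      set w : List Char := (cs.drop a).take (b - a) with hwdef
      have hslice : PySem.List.slice cs (some (a : Int)) (some (b : Int)) = w := by
        rw [PySem.List.slice_natCast]
      have hwlen : w.length = b - a := by
        rw [hwdef]; simp; omega
      have hwne : w ≠ [] := by
        intro h
        have := congrArg List.length h
        rw [hwlen] at this
        simp at this
        omega
      have hpeel : PySem.List.slice w (some 1) (some (-1)) =
          (cs.drop (a + 1)).take ((b - 1) - (a + 1)) := by
        rw [pv_slice_peel, hwlen, hwdef, List.drop_take, List.take_take, List.drop_drop]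
        have h1 : min (b - a - 2) (b - a - 1) = (b - 1) - (a + 1) := by omega
        rw [h1]
      have hrec : pvALoop cs ((a : Int) + 1) ((b : Int) - 1) = pvALoop cs ((a + 1 : Nat) : Int) ((b - 1 : Nat) : Int) := by
        congr 1 <;> omega
      rw [hslice, hrec, ih ((b - 1) - (a + 1)) (by omega) cs (a + 1) (b - 1) rfl (by omega)]
      rw [pvHelper_cons w hwne, hpeel]
      rw [pv_foldl_factor _
        (fun j => [String.mk (PySem.List.slice w none (some j)), String.mk (PySem.List.slice w (some j) none)])
        (by intro acc j; simp)]
      rw [pv_foldl_factor _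
        (fun j => [String.mk (PySem.List.slice w none (some j)), String.mk (PySem.List.slice w (some j) none)])
        (by intro acc j; simp) _ [String.mk w]]
      simp [hwlen]
    · have hba : b ≤ a := Nat.le_of_not_lt hab
      rw [pvALoop, dif_neg]
      · have h0 : b - a = 0 := by omega
        rw [h0]
        simp [pvHelper, pvHelperF]
      · intro h
        have : (a : Int) < (b : Int) := h.2
        omega

-- ===== VERDICT (by name: the statement is the Claim_ definition above) =====
theorem get_all_ngrams_spec : Claim_equal_get_all_ngrams := by
  intro sequence sort _ hpre
  unfold Pre_get_all_ngrams at hpre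
  subst hpre
  unfold Spec_get_all_ngrams get_all_ngrams get_all_ngrams_alt
  simp only [if_neg (by simp : ¬ (false = true))]
  have h := pvALoop_eq_helper sequence.toList.length sequence.toList 0 sequence.toList.length rfl le_rfl []
  rw [Nat.cast_zero] at h
  rw [h]
  rw [Nat.sub_zero, List.drop_zero, List.take_length, List.nil_append]

def get_all_ngrams_raises : Claim_raises_get_all_ngrams := by
  unfold Claim_raises_get_all_ngrams
  exact ⟨by intro s b _ hr; unfold Raises_get_all_ngrams at hr; unfold Pre_get_all_ngrams; simp [hr], by decide⟩
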